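-- pv_equiv track=rewrite | github.com/wiki2beamer/wiki2beamer | src/wiki2beamer/main.py | _transform_mini_parser
-- ===== SOURCE A (Python) =====
-- from typing import Any, Dict, List, Match, Optional, Pattern, Tuple, Type, TypeVar
--
-- def _transform_mini_parser(character: str, replacement: str, string: str) -> str:
--     # implemented as a state-machine
--     output: List[str] = []
--     typewriter: List[str] = []
--     seen_at, seen_escape = False, False
--     for char in string:
--         if seen_escape:
--             if char == character:
--                 output.append(character)
--             else:
--                 output.append("\\" + char)
--             seen_escape = False
--         elif char == "\\":
--             seen_escape = True
--         elif char == character: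
--             if seen_at:
--                 seen_at = False
--                 output, typewriter = typewriter, output
--                 output.append("\\" + replacement + "{")
--                 output += typewriter
--                 output.append("}")
--                 typewriter = []
--             else:
--                 seen_at = True
--                 output, typewriter = typewriter, output
--         else:
--             output.append(char)
--     if seen_at:
--         output, typewriter = typewriter, output
--         output.append(character)
--         output += typewriter
--     return "".join(output)
-- ===== SOURCE B (Python) =====
-- def _transform_mini_parser(character: str, replacement: str, string: str) -> str:
--     # split-then-pair: resolve escapes and split at unescaped delimiters in one pass,
--     # then pair up consecutive delimited segments and wrap the inner ones
--     parts, cur, esc = [], [], False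
--     for c in string:
--         if esc:
--             cur.append(character if c == character else "\\" + c)
--             esc = False
--         elif c == "\\":
--             esc = True
--         elif c == character:
--             parts.append("".join(cur))
--             cur = []
--         else:
--             cur.append(c)
--     parts.append("".join(cur))
--     res = [parts[0]]
--     i = 1
--     while i + 1 < len(parts):
--         res.append("\\" + replacement + "{" + parts[i] + "}" + parts[i + 1])
--         i += 2
--     if i < len(parts):
--         res.append(character + parts[i])
--     return "".join(res)
-- ===== Notes on version B (the rewrite author's own statement) =====
-- stated objective: simpler
-- what changed: A's state machine that eagerly swaps two output lists at each delimiter is replaced by a split-at-unescaped-delimiters pass (escapes resolved while splitting) followed by pairing consecutive segments, wrapping each paired inner segment and emitting a literal delimiter before a trailing unpaired one.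
import Mathlib
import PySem

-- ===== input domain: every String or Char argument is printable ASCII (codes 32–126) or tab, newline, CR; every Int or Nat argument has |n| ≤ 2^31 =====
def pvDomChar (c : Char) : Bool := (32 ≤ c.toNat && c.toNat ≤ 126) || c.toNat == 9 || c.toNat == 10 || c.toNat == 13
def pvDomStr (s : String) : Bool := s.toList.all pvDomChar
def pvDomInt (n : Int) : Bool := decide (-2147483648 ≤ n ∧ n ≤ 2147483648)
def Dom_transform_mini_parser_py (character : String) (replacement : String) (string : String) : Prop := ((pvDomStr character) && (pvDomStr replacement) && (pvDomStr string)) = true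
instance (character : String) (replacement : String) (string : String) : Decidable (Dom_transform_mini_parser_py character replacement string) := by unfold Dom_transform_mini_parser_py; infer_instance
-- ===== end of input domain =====

-- B replaces A's list-swapping state machine by a split-at-delimiters pass followed by
-- pairing consecutive segments (objective: simpler decomposition, same cost).

-- ===== PORT A =====
-- state: (output, typewriter, seen_at, seen_escape); strings kept as List Char, "".join = flatten
def pvAstep (ch rep : List Char) (st : List (List Char) × List (List Char) × Bool × Bool)
    (c : Char) : List (List Char) × List (List Char) × Bool × Bool :=
  match st with
  | (output, typewriter, seen_at, seen_escape) =>
    if seen_escape then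
      if [c] = ch then (output ++ [ch], typewriter, seen_at, false)
      else (output ++ [['\\', c]], typewriter, seen_at, false)
    else if c = '\\' then (output, typewriter, seen_at, true)
    else if [c] = ch then
      if seen_at then
        -- swap, append "\"+replacement+"{", += typewriter, append "}"
        (typewriter ++ ['\\' :: rep ++ ['{']] ++ output ++ [['}']], [], false, false)
      else (typewriter, output, true, false)
    else (output ++ [[c]], typewriter, seen_at, false)

def transform_mini_parser_py (character : String) (replacement : String) (string : String) : String :=
  match string.toList.foldl (pvAstep character.toList replacement.toList) ([], [], false, false) with
  | (output, typewriter, seen_at, _) =>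
    if seen_at then String.mk ((typewriter ++ [character.toList] ++ output).flatten)
    else String.mk output.flatten

-- ===== PORT B =====
-- state: (parts, cur, esc); at an unescaped delimiter the joined cur is closed off into parts
def pvBstep (ch : List Char) (st : List (List Char) × List (List Char) × Bool)
    (c : Char) : List (List Char) × List (List Char) × Bool :=
  match st with
  | (parts, cur, esc) =>
    if esc then (parts, cur ++ [if [c] = ch then ch else ['\\', c]], false)
    else if c = '\\' then (parts, cur, true)
    else if [c] = ch then (parts ++ [cur.flatten], [], false)
    else (parts, cur ++ [[c]], false)

-- the while-loop of Source B: consume the segments after parts[0] two at a time,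
-- wrapping the first of each pair; a leftover single segment follows a literal delimiter
def pvBrender (ch rep : List Char) : List (List Char) → List Char
  | [] => []
  | [s] => ch ++ s
  | a :: b :: rest => ('\\' :: rep ++ '{' :: a ++ ['}']) ++ b ++ pvBrender ch rep rest

def transform_mini_parser_py_alt (character : String) (replacement : String) (string : String) : String :=
  match string.toList.foldl (pvBstep character.toList) ([], [], false) with
  | (parts, cur, _) =>
    match parts ++ [cur.flatten] with
    | [] => ""
    | p :: rest => String.mk (p ++ pvBrender character.toList replacement.toList rest)

-- ===== PRECONDITION & SPEC =====
def Spec_transform_mini_parser_py (character : String) (replacement : String) (string : String) (out : String) : Prop := out = transform_mini_parser_py_alt character replacement string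
instance (character : String) (replacement : String) (string : String) (out : String) : Decidable (Spec_transform_mini_parser_py character replacement string out) := by unfold Spec_transform_mini_parser_py; infer_instance

-- ===== CLAIM (what is proved, stated in full; the proofs are below) =====
def Claim_equal_transform_mini_parser_py : Prop := ∀ (character : String) (replacement : String) (string : String), Dom_transform_mini_parser_py character replacement string → Spec_transform_mini_parser_py character replacement string (transform_mini_parser_py character replacement string)

-- ===== LEMMAS AND PROOFS =====

-- rendering of a fully-paired prefix of segments: wrap every even-positioned one (1-based)
def pvEvenR (rep : List Char) : List (List Char) → List Char
  | [] => []
  | [s] => '\\' :: rep ++ '{' :: s ++ ['}']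
  | a :: b :: rest => ('\\' :: rep ++ '{' :: a ++ ['}']) ++ b ++ pvEvenR rep rest

def pvRC (rep : List Char) : List (List Char) → List Char
  | [] => []
  | a :: rest => a ++ pvEvenR rep rest

theorem pvTwoStep {α : Type} {P : List α → Prop} (h0 : P []) (h1 : ∀ a, P [a])
    (h2 : ∀ a b t, P t → P (a :: b :: t)) : ∀ t, P t
  | [] => h0
  | [a] => h1 a
  | a :: b :: t => h2 a b t (pvTwoStep h0 h1 h2 t)

theorem pvEvenR_append_even (rep : List Char) :
    ∀ t, t.length % 2 = 0 → ∀ x, pvEvenR rep (t ++ [x]) =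
      pvEvenR rep t ++ ('\\' :: rep ++ '{' :: x ++ ['}']) := by
  refine pvTwoStep ?_ ?_ ?_
  · intro _ x; simp [pvEvenR]
  · intro a h; simp at h
  · intro a b t ih h x
    simp only [List.length_cons] at h
    simp [pvEvenR, ih (by omega) x]

theorem pvEvenR_append_odd (rep : List Char) :
    ∀ t, t.length % 2 = 1 → ∀ x, pvEvenR rep (t ++ [x]) = pvEvenR rep t ++ x := by
  refine pvTwoStep ?_ ?_ ?_
  · intro h; simp at h
  · intro a _ x; simp [pvEvenR]
  · intro a b t ih h x
    simp only [List.length_cons] at h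
    simp [pvEvenR, ih (by omega) x]

theorem pvBrender_append_odd (ch rep : List Char) :
    ∀ t, t.length % 2 = 1 → ∀ x, pvBrender ch rep (t ++ [x]) = pvEvenR rep t ++ x := by
  refine pvTwoStep ?_ ?_ ?_
  · intro h; simp at h
  · intro a _ x; simp [pvBrender, pvEvenR]
  · intro a b t ih h x
    simp only [List.length_cons] at h
    simp [pvBrender, pvEvenR, ih (by omega) x]

theorem pvBrender_append_even (ch rep : List Char) :
    ∀ t, t.length % 2 = 0 → ∀ x, pvBrender ch rep (t ++ [x]) = pvEvenR rep t ++ ch ++ x := by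
  refine pvTwoStep ?_ ?_ ?_
  · intro _ x; simp [pvBrender, pvEvenR]
  · intro a h; simp at h
  · intro a b t ih h x
    simp only [List.length_cons] at h
    simp [pvBrender, pvEvenR, ih (by omega) x]

-- pvRC versions
theorem pvRC_append_even (rep : List Char) (parts : List (List Char))
    (h : parts.length % 2 = 0) (x : List Char) :
    pvRC rep (parts ++ [x]) = pvRC rep parts ++ x := by
  cases parts with
  | nil => simp [pvRC, pvEvenR]
  | cons a t =>
    simp only [List.length_cons] at h
    simp [pvRC, pvEvenR_append_odd rep t (by omega) x]

theorem pvRC_append_odd (rep : List Char) (parts : List (List Char))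
    (h : parts.length % 2 = 1) (x : List Char) :
    pvRC rep (parts ++ [x]) = pvRC rep parts ++ ('\\' :: rep ++ '{' :: x ++ ['}']) := by
  cases parts with
  | nil => simp at h
  | cons a t =>
    simp only [List.length_cons] at h
    simp [pvRC, pvEvenR_append_even rep t (by omega) x]

-- B's final match, as a function
def pvBfinal (ch rep : List Char) (l : List (List Char)) : List Char :=
  match l with
  | [] => []
  | p :: rest => p ++ pvBrender ch rep rest

theorem pvBfinal_even (ch rep : List Char) (parts : List (List Char))
    (h : parts.length % 2 = 0) (x : List Char) :
    pvBfinal ch rep (parts ++ [x]) = pvRC rep parts ++ x := by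
  cases parts with
  | nil => simp [pvBfinal, pvBrender, pvRC]
  | cons a t =>
    simp only [List.length_cons] at h
    simp [pvBfinal, pvRC, pvBrender_append_odd ch rep t (by omega) x]

theorem pvBfinal_odd (ch rep : List Char) (parts : List (List Char))
    (h : parts.length % 2 = 1) (x : List Char) :
    pvBfinal ch rep (parts ++ [x]) = pvRC rep parts ++ ch ++ x := by
  cases parts with
  | nil => simp at h
  | cons a t =>
    simp only [List.length_cons] at h
    simp [pvBfinal, pvRC, pvBrender_append_even ch rep t (by omega) x]

-- the coupling invariant between A's swap-machine state and B's split state,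
-- and the main fold lemma: related states yield equal final results
theorem pvKey (ch rep : List Char) :
    ∀ (cs : List Char) (out tw : List (List Char)) (at_ esc : Bool)
      (parts cur : List (List Char)),
      (at_ = true → parts.length % 2 = 1 ∧ tw.flatten = pvRC rep parts ∧
        out.flatten = cur.flatten) →
      (at_ = false → parts.length % 2 = 0 ∧ tw = [] ∧
        out.flatten = pvRC rep parts ++ cur.flatten) →
      (match cs.foldl (pvAstep ch rep) (out, tw, at_, esc) with
        | (o, t, a, _) => if a then (t ++ [ch] ++ o).flatten else o.flatten) =
      (match cs.foldl (pvBstep ch) (parts, cur, esc) with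
        | (p, c, _) => pvBfinal ch rep (p ++ [c.flatten])) := by
  intro cs
  induction cs with
  | nil =>
    intro out tw at_ esc parts cur hT hF
    cases at_ with
    | false =>
      obtain ⟨hlen, htw, hout⟩ := hF rfl
      simp only [List.foldl_nil, if_neg (Bool.false_ne_true)]
      rw [pvBfinal_even ch rep parts hlen, hout]
    | true =>
      obtain ⟨hlen, htw, hout⟩ := hT rfl
      simp only [List.foldl_nil]
      rw [pvBfinal_odd ch rep parts hlen, List.flatten_append, List.flatten_append, htw, hout]
      simp
  | cons c cs ih =>
    intro out tw at_ esc parts cur hT hF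
    simp only [List.foldl_cons]
    by_cases hesc : esc = true
    · subst hesc
      simp only [pvAstep, pvBstep, if_true]
      by_cases hc : [c] = ch
      · rw [if_pos hc]
        apply ih
        · intro ha; obtain ⟨h1, h2, h3⟩ := hT ha; exact ⟨h1, h2, by simp [h3, hc]⟩
        · intro ha; obtain ⟨h1, h2, h3⟩ := hF ha
          exact ⟨h1, h2, by simp [h3, hc]⟩
      · rw [if_neg hc]
        apply ih
        · intro ha; obtain ⟨h1, h2, h3⟩ := hT ha; exact ⟨h1, h2, by simp [h3, hc]⟩
        · intro ha; obtain ⟨h1, h2, h3⟩ := hF ha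
          exact ⟨h1, h2, by simp [h3, hc]⟩
    · replace hesc : esc = false := by revert hesc; cases esc <;> simp
      subst hesc
      simp only [pvAstep, pvBstep, if_neg (Bool.false_ne_true)]
      by_cases hbs : c = '\\'
      · rw [if_pos hbs, if_pos hbs]
        exact ih out tw at_ true parts cur hT hF
      · rw [if_neg hbs, if_neg hbs]
        by_cases hc : [c] = ch
        · rw [if_pos hc, if_pos hc]
          cases at_ with
          | true =>
            obtain ⟨h1, h2, h3⟩ := hT rfl
            apply ih
            · intro ha; exact absurd ha (by simp)
            · intro _
              refine ⟨by simp [Nat.add_mod, h1], rfl, ?_⟩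
              rw [pvRC_append_odd rep parts h1 cur.flatten]
              simp [h2, h3]
          | false =>
            obtain ⟨h1, h2, h3⟩ := hF rfl
            simp only [if_neg (Bool.false_ne_true)]
            apply ih
            · intro _
              refine ⟨by simp [Nat.add_mod, h1], ?_, by simp [h2]⟩
              rw [pvRC_append_even rep parts h1 cur.flatten, h3]
            · intro ha; exact absurd ha (by simp)
        · rw [if_neg hc, if_neg hc]
          apply ih
          · intro ha; obtain ⟨h1, h2, h3⟩ := hT ha; exact ⟨h1, h2, by simp [h3]⟩
          · intro ha; obtain ⟨h1, h2, h3⟩ := hF ha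
            exact ⟨h1, h2, by simp [h3]⟩

-- ===== VERDICT (by name: the statement is the Claim_ definition above) =====
theorem transform_mini_parser_py_spec : Claim_equal_transform_mini_parser_py := by
  intro character replacement string _
  unfold Spec_transform_mini_parser_py transform_mini_parser_py transform_mini_parser_py_alt
  have h := pvKey character.toList replacement.toList string.toList [] [] false false [] []
    (by intro h; exact absurd h (by simp))
    (by intro _; exact ⟨rfl, rfl, rfl⟩)
  rcases hA : string.toList.foldl (pvAstep character.toList replacement.toList)
      ([], [], false, false) with ⟨o, t, a, e⟩
  rcases hB : string.toList.foldl (pvBstep character.toList) ([], [], false) with ⟨p, cu, e'⟩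
  rw [hA, hB] at h
  simp only at h ⊢
  cases a with
  | true =>
    rw [if_pos rfl] at h
    rw [if_pos rfl, h]
    cases hp : p ++ [cu.flatten] with
    | nil => exact absurd hp (by simp)
    | cons q rest => simp [pvBfinal]
  | false =>
    rw [if_neg (Bool.false_ne_true)] at h
    rw [if_neg (Bool.false_ne_true), h]
    cases hp : p ++ [cu.flatten] with
    | nil => exact absurd hp (by simp)
    | cons q rest => simp [pvBfinal]
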